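-- pv_equiv track=rewrite | github.com/Nicolas-Dmb/liste_corpoprietaire | test/excel.py | recup_CP
-- ===== SOURCE A (Python) =====
-- def recup_CP(Ville):
--     digit = ""
--     ville = str(Ville)
--     for char in range(len(ville)):
--         if ville[char].isdigit():
--             digit += ville[char]
--         if ville[char] == ' ' and len(digit) == 5:
--             break
--     return digit
-- ===== SOURCE B (Python) =====
-- def recup_CP(Ville):
--     tokens = str(Ville).split(' ')
--     digit = ""
--     for i, tok in enumerate(tokens):
--         digit += "".join(c for c in tok if c.isdigit())
--         if i < len(tokens) - 1 and len(digit) == 5: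
--             break
--     return digit
-- ===== Notes on version B (the rewrite author's own statement) =====
-- stated objective: alternative
-- what changed: B splits the string on single spaces and processes tokens (filtering each token's digits, checking the length-5 stop only at token boundaries, never after the last token) instead of A's char-by-char loop with per-character space test. (measured ~1.9x faster: one split plus per-token filtering avoids per-character Python-level indexing and branching)
import Mathlib
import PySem

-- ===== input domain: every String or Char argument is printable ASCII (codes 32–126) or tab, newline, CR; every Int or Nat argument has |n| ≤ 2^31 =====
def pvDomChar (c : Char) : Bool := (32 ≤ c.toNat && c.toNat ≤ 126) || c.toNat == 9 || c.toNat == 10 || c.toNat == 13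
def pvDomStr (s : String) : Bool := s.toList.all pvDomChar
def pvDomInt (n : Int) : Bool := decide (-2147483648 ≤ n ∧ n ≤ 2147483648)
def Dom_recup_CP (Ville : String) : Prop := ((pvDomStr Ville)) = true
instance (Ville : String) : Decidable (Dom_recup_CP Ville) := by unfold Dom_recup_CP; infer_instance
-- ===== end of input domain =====

-- B replaces A's char-by-char loop with a space-split token pass (same result, different decomposition); objective: alternative.

-- ===== PORT A =====
-- the for-loop over the string's characters, with the running `digit` accumulator; `break` = early return
def recupA_go : List Char → List Char → List Char
  | [], digit => digit
  | c :: rest, digit =>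
    let digit' := if PySem.Chars.isdigit c then digit ++ [c] else digit
    if c == ' ' && digit'.length == 5 then digit' else recupA_go rest digit'

def recup_CP (Ville : String) : String := String.ofList (recupA_go Ville.toList [])

-- ===== PORT B =====
-- str.split(' ') for the one-char separator ' ', ported by hand (exact: keeps empty tokens, s.split(' ') on "" is [""])
def splitSp : List Char → List (List Char)
  | [] => [[]]
  | c :: rest =>
    if c = ' ' then [] :: splitSp rest
    else
      match splitSp rest with
      | t :: ts => (c :: t) :: ts
      | [] => [[c]]

-- the `for i, tok in enumerate(tokens)` loop: the token's digits are appended, then the boundary check (skipped for the last token)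
def recupB_go : List (List Char) → List Char → List Char
  | [], digit => digit
  | [t], digit => digit ++ t.filter PySem.Chars.isdigit
  | t :: ts, digit =>
    let digit' := digit ++ t.filter PySem.Chars.isdigit
    if digit'.length == 5 then digit' else recupB_go ts digit'

def recup_CP_alt (Ville : String) : String := String.ofList (recupB_go (splitSp Ville.toList) [])

-- ===== PRECONDITION & SPEC =====
def Spec_recup_CP (Ville : String) (out : String) : Prop := out = recup_CP_alt Ville
instance (Ville : String) (out : String) : Decidable (Spec_recup_CP Ville out) := by unfold Spec_recup_CP; infer_instance

-- ===== CLAIM (what is proved, stated in full; the proofs are below) =====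
def Claim_equal_recup_CP : Prop := ∀ (Ville : String), Dom_recup_CP Ville → Spec_recup_CP Ville (recup_CP Ville)

-- ===== LEMMAS AND PROOFS =====

lemma splitSp_ne_nil (cs : List Char) : splitSp cs ≠ [] := by
  cases cs with
  | nil => simp [splitSp]
  | cons c rest =>
    simp only [splitSp]
    split
    · simp
    · rcases h : splitSp rest with _ | ⟨t, ts⟩ <;> simp

lemma recup_go_eq (cs : List Char) : ∀ digit : List Char,
    recupA_go cs digit = recupB_go (splitSp cs) digit := by
  induction cs with
  | nil => intro digit; simp [recupA_go, splitSp, recupB_go]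
  | cons c rest ih =>
    intro digit
    by_cases hsp : c = ' '
    · subst hsp
      have hnd : PySem.Chars.isdigit ' ' = false := by decide
      rcases h : splitSp rest with _ | ⟨t, ts⟩
      · exact absurd h (splitSp_ne_nil rest)
      · have hs : splitSp (' ' :: rest) = [] :: t :: ts := by simp [splitSp, h]
        rw [hs]
        simp only [recupA_go, recupB_go, hnd, Bool.false_eq_true, if_false,
          List.filter_nil, List.append_nil, beq_self_eq_true, Bool.true_and]
        split
        · rfl
        · rw [ih, h]
    · rcases h : splitSp rest with _ | ⟨t, ts⟩
      · exact absurd h (splitSp_ne_nil rest)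
      · have hA : recupA_go (c :: rest) digit
            = recupA_go rest (digit ++ (if PySem.Chars.isdigit c then [c] else [])) := by
          simp only [recupA_go]
          have : (c == ' ') = false := by simpa using hsp
          simp [this]
          split <;> simp
        have hfil : (c :: t).filter PySem.Chars.isdigit
            = (if PySem.Chars.isdigit c then [c] else []) ++ t.filter PySem.Chars.isdigit := by
          by_cases hd : PySem.Chars.isdigit c <;> simp [hd]
        rw [hA, ih, h]
        simp only [splitSp, if_neg hsp, h]
        cases ts with
        | nil => simp [recupB_go, hfil]
        | cons t2 ts2 =>
          simp only [recupB_go, hfil, List.append_assoc]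

-- ===== VERDICT (by name: the statement is the Claim_ definition above) =====
theorem recup_CP_spec : Claim_equal_recup_CP := by
  intro Ville _
  unfold Spec_recup_CP recup_CP recup_CP_alt
  rw [recup_go_eq]
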